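-- pv_equiv track=rewrite | github.com/MrBrantCode/unitest_baseline | mut_generate/mist_train_cf/cf_64414/solution.py | below_zero
-- ===== SOURCE A (Python) =====
-- from typing import List, Tuple
--
-- def below_zero(operations: List[Tuple[str, int]], case_insensitive: bool = False) -> bool:
--     balance = 0
--     for op, amount in operations:
--         if case_insensitive:
--             op = op.lower()
--         if op == 'deposit':
--             balance += amount
--         elif op == 'withdrawal':
--             balance -= amount
--
--         if balance < 0:
--             return True
--
--     return False
-- ===== SOURCE B (Python) =====
-- def below_zero(operations, case_insensitive=False):
--     # map each operation to a signed delta, build the running balances, then check their minimum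
--     def delta(op, amount):
--         if case_insensitive:
--             op = op.lower()
--         return amount if op == 'deposit' else -amount if op == 'withdrawal' else 0
--     deltas = [delta(op, amount) for op, amount in operations]
--     balances = []
--     running = 0
--     for d in deltas:
--         running += d
--         balances.append(running)
--     return min(balances, default=0) < 0
-- ===== Notes on version B (the rewrite author's own statement) =====
-- stated objective: alternative
-- what changed: B replaces A's fused early-return loop by three separate phases: map each operation to a signed delta, build the full prefix-sum list, and decide via min(balances, default=0) < 0.
import Mathlib
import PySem

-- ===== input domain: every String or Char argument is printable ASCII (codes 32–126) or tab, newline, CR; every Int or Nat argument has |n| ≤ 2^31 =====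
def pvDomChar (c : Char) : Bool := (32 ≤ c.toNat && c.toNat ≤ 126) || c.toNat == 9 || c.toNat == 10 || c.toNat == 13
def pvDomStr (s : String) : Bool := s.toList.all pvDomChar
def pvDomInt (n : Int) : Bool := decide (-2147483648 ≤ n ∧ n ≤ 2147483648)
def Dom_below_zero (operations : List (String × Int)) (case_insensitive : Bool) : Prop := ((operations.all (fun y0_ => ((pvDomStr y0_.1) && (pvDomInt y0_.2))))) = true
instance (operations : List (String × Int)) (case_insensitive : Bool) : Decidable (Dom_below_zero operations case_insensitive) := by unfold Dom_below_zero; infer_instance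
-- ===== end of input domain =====

-- B restructures A's fused early-return loop into three phases (signed deltas, prefix sums, min < 0); return values proved equal (alternative decomposition, no speed claim).

-- ===== PORT A =====
-- the for-loop with early return, state = balance
def below_zero_go (operations : List (String × Int)) (case_insensitive : Bool) (balance : Int) : Bool :=
  match operations with
  | [] => false
  | (op, amount) :: rest =>
    let op' := if case_insensitive then PySem.Str.lower op else op
    let balance' :=
      if op' == "deposit" then balance + amount
      else if op' == "withdrawal" then balance - amount
      else balance
    if balance' < 0 then true else below_zero_go rest case_insensitive balance'

def below_zero (operations : List (String × Int)) (case_insensitive : Bool) : Bool :=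
  below_zero_go operations case_insensitive 0

-- ===== PORT B =====
-- phase 1: one signed delta per operation
def pvDelta (case_insensitive : Bool) (op : String) (amount : Int) : Int :=
  let op' := if case_insensitive then PySem.Str.lower op else op
  if op' == "deposit" then amount
  else if op' == "withdrawal" then -amount
  else 0

-- phase 2: the running-balance list (the 'for d in deltas: running += d; balances.append(running)' loop)
def pvRunningSums (deltas : List Int) (running : Int) : List Int :=
  match deltas with
  | [] => []
  | d :: rest => (running + d) :: pvRunningSums rest (running + d)

def below_zero_alt (operations : List (String × Int)) (case_insensitive : Bool) : Bool :=
  let deltas := operations.map (fun p => pvDelta case_insensitive p.1 p.2)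
  let balances := pvRunningSums deltas 0
  decide (((PySem.List.min? balances (fun x => x)).getD 0) < 0)

-- ===== PRECONDITION & SPEC =====
def Spec_below_zero (operations : List (String × Int)) (case_insensitive : Bool) (out : Bool) : Prop := out = below_zero_alt operations case_insensitive
instance (operations : List (String × Int)) (case_insensitive : Bool) (out : Bool) : Decidable (Spec_below_zero operations case_insensitive out) := by unfold Spec_below_zero; infer_instance

-- ===== CLAIM (what is proved, stated in full; the proofs are below) =====
def Claim_equal_below_zero : Prop := ∀ (operations : List (String × Int)) (case_insensitive : Bool), Dom_below_zero operations case_insensitive → Spec_below_zero operations case_insensitive (below_zero operations case_insensitive)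

-- ===== LEMMAS AND PROOFS =====

-- min with default 0 is < 0 iff some element is < 0
theorem pv_min_lt_zero (l : List Int) :
    (((PySem.List.min? l (fun x => x)).getD 0) < 0) ↔ (∃ x ∈ l, x < 0) := by
  induction l with
  | nil => simp [PySem.List.min?]
  | cons a t ih =>
    rw [PySem.List.min?_id_cons]
    simp only [Option.getD_some]
    constructor
    · intro h
      have : t.foldl min a ∈ a :: t := by
        have := PySem.List.min?_mem (xs := a :: t) (key := fun x => x)
          (m := t.foldl min a) (by rw [PySem.List.min?_id_cons])
        exact this
      exact ⟨_, this, h⟩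
    · rintro ⟨x, hx, hxneg⟩
      have hle : t.foldl min a ≤ x := by
        have := PySem.List.min?_isMin (xs := a :: t) (key := fun x => x)
          (m := t.foldl min a) (by rw [PySem.List.min?_id_cons]) x hx
        simpa using this
      omega

-- A's loop from balance `bal` returns true iff some running sum from `bal` is negative
theorem pv_go_iff (ops : List (String × Int)) (ci : Bool) (bal : Int) :
    below_zero_go ops ci bal =
      (pvRunningSums (ops.map (fun p => pvDelta ci p.1 p.2)) bal).any (fun x => decide (x < 0)) := by
  induction ops generalizing bal with
  | nil => simp [below_zero_go, pvRunningSums]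
  | cons p rest ih =>
    obtain ⟨op, amount⟩ := p
    simp only [below_zero_go, List.map_cons, pvRunningSums, pvDelta]
    have hbal : (if (if ci then PySem.Str.lower op else op) == "deposit" then bal + amount
        else if (if ci then PySem.Str.lower op else op) == "withdrawal" then bal - amount
        else bal)
      = bal + (if (if ci then PySem.Str.lower op else op) == "deposit" then amount
        else if (if ci then PySem.Str.lower op else op) == "withdrawal" then -amount
        else 0) := by
      split_ifs <;> omega
    rw [hbal]
    set b' := bal + (if (if ci then PySem.Str.lower op else op) == "deposit" then amount
        else if (if ci then PySem.Str.lower op else op) == "withdrawal" then -amount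
        else 0) with hb'
    by_cases h : b' < 0
    · simp [h]
    · simp [h, ih b', pvDelta]

-- ===== VERDICT (by name: the statement is the Claim_ definition above) =====
theorem below_zero_spec : Claim_equal_below_zero := by
  intro ops ci _
  unfold Spec_below_zero below_zero below_zero_alt
  rw [pv_go_iff, Bool.eq_iff_iff]
  simp [pv_min_lt_zero, List.any_eq_true]
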